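-- pv_equiv track=rewrite | github.com/snyke7/aoc2023 | aoc2015/day19.py | into_elements
-- ===== SOURCE A (Python) =====
-- def into_elements(rep):
--     result = []
--     cur_el = rep[0]
--     for c in rep[1:]:
--         if c.isupper():
--             result.append(cur_el)
--             cur_el = c
--         else:
--             cur_el += c
--     result.append(cur_el)
--     return result
-- ===== SOURCE B (Python) =====
-- def into_elements(rep):
--     bounds = [0] + [i for i in range(1, len(rep)) if rep[i].isupper()]
--     return [rep[a:b] for a, b in zip(bounds, bounds[1:] + [len(rep)])]
-- ===== Notes on version B (the rewrite author's own statement) =====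
-- stated objective: alternative
-- what changed: A builds tokens in one incremental pass mutating a current-token accumulator; B first collects the list of boundary indices (0 plus every uppercase position) and then slices the string between consecutive boundaries.
import Mathlib
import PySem

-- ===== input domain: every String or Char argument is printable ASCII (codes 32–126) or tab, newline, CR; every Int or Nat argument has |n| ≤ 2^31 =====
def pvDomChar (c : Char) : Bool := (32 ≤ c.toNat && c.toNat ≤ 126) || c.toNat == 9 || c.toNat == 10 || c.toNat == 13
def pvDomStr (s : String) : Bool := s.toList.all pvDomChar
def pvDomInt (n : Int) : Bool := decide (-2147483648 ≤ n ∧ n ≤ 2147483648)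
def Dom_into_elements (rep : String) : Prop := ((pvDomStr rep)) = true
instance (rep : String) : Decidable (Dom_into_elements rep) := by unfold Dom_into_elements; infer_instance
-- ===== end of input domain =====

-- B replaces A's single incremental token-building pass by collecting the boundary
-- indices first and then slicing the string between consecutive boundaries (objective:
-- alternative decomposition, similar cost).

-- ===== PORT A =====
def into_elements (rep : String) : List String :=
  match rep.toList with
  | [] => []  -- Python: rep[0] raises IndexError here; excluded by Pre_into_elements
  | c :: rest =>
    let st := rest.foldl
      (fun (st : List (List Char) × List Char) ch =>
        if PySem.Chars.isupper ch then (st.1 ++ [st.2], [ch]) else (st.1, st.2 ++ [ch]))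
      ([], [c])
    (st.1 ++ [st.2]).map String.mk

-- ===== PORT B =====
def into_elements_alt (rep : String) : List String :=
  let cs := rep.toList
  let n : Int := cs.length
  -- bounds = [0] + [i for i in range(1, len(rep)) if rep[i].isupper()]  (i always in range)
  let bounds : List Int :=
    0 :: (PySem.List.pyRange 1 n 1).filter (fun i => PySem.Chars.isupper (PySem.List.pyGetD cs i ' '))
  -- [rep[a:b] for a, b in zip(bounds, bounds[1:] + [len(rep)])]
  (bounds.zip (bounds.tail ++ [n])).map
    (fun p => String.mk (PySem.List.slice cs (some p.1) (some p.2)))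

-- ===== PRECONDITION & SPEC =====
-- Pre_ excludes exactly the empty string, on which A raises IndexError.
def Pre_into_elements (rep : String) : Prop := rep ≠ ""
instance (rep : String) : Decidable (Pre_into_elements rep) := by unfold Pre_into_elements; infer_instance
def pvWitness_into_elements : String := "HOHe"

def Spec_into_elements (rep : String) (out : List String) : Prop := out = into_elements_alt rep
instance (rep : String) (out : List String) : Decidable (Spec_into_elements rep out) := by unfold Spec_into_elements; infer_instance

-- ===== CLAIM (what is proved, stated in full; the proofs are below) =====
def Claim_equal_into_elements : Prop := ∀ (rep : String), Dom_into_elements rep → Pre_into_elements rep → Spec_into_elements rep (into_elements rep)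

-- ===== LEMMAS AND PROOFS =====

-- A's loop as structural recursion on the remaining characters
def goTok (cur : List Char) : List Char → List (List Char)
  | [] => [cur]
  | ch :: t => if PySem.Chars.isupper ch then cur :: goTok [ch] t else goTok (cur ++ [ch]) t

theorem goTok_ne_nil (cur : List Char) (t : List Char) : goTok cur t ≠ [] := by
  induction t generalizing cur with
  | nil => simp [goTok]
  | cons ch t ih => simp only [goTok]; split <;> simp [ih]

theorem getLast?_cons_of_ne_nil' {α : Type} (a : α) (l : List α) (h : l ≠ []) :
    (a :: l).getLast? = l.getLast? := by
  cases l with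
  | nil => exact absurd rfl h
  | cons b t => exact List.getLast?_cons_cons

theorem getLastD_cons_of_ne_nil {α : Type} (a : α) (l : List α) (h : l ≠ []) (d : α) :
    (a :: l).getLastD d = l.getLastD d := by
  cases l with
  | nil => exact absurd rfl h
  | cons b t => rfl

theorem getLastD_mem {α : Type} (l : List α) (h : l ≠ []) (d : α) : l.getLastD d ∈ l := by
  induction l with
  | nil => exact absurd rfl h
  | cons a t ih =>
    cases t with
    | nil => simp
    | cons b t' => exact List.mem_cons_of_mem a (ih (by simp))

theorem dropLast_append_getLastD {α : Type} (l : List α) (h : l ≠ []) (d : α) :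
    l.dropLast ++ [l.getLastD d] = l := by
  induction l with
  | nil => exact absurd rfl h
  | cons a t ih =>
    cases t with
    | nil => rfl
    | cons b t' =>
      rw [List.dropLast_cons_of_ne_nil (by simp), getLastD_cons_of_ne_nil a _ (by simp),
        List.cons_append, ih (by simp)]

theorem foldl_goTok (t : List Char) (res : List (List Char)) (cur : List Char) :
    (t.foldl
      (fun (st : List (List Char) × List Char) ch =>
        if PySem.Chars.isupper ch then (st.1 ++ [st.2], [ch]) else (st.1, st.2 ++ [ch]))
      (res, cur)).1 ++
    [(t.foldl
      (fun (st : List (List Char) × List Char) ch =>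
        if PySem.Chars.isupper ch then (st.1 ++ [st.2], [ch]) else (st.1, st.2 ++ [ch]))
      (res, cur)).2] = res ++ goTok cur t := by
  induction t generalizing res cur with
  | nil => simp [goTok]
  | cons ch t ih =>
    simp only [List.foldl_cons, goTok]
    by_cases h : PySem.Chars.isupper ch <;> simp [h, ih]

-- B at the Nat level
def boundsN (cs : List Char) : List Nat :=
  0 :: ((List.range (cs.length - 1)).map (· + 1)).filter
        (fun i => PySem.Chars.isupper (cs.getD i ' '))

def pairsOf (l : List Nat) (n : Nat) : List (Nat × Nat) := l.zip (l.tail ++ [n])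

def tokensN (cs : List Char) : List (List Char) :=
  (pairsOf (boundsN cs) cs.length).map (fun p => (cs.drop p.1).take (p.2 - p.1))

theorem goTok_snoc (t : List Char) (cur : List Char) (ch : Char) :
    goTok cur (t ++ [ch]) =
      if PySem.Chars.isupper ch then goTok cur t ++ [[ch]]
      else (goTok cur t).dropLast ++ [(goTok cur t).getLastD [] ++ [ch]] := by
  induction t generalizing cur with
  | nil => by_cases h : PySem.Chars.isupper ch <;> simp [goTok, h]
  | cons a t ih =>
    simp only [List.cons_append, goTok]
    by_cases ha : PySem.Chars.isupper a
    · simp only [ha, if_true, ih]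
      by_cases h : PySem.Chars.isupper ch
      · simp [h]
      · simp [h, List.dropLast_cons_of_ne_nil (goTok_ne_nil _ _),
          getLast?_cons_of_ne_nil' _ _ (goTok_ne_nil _ _)]
    · simp only [if_neg ha]
      exact ih (cur ++ [a])

theorem mem_boundsN_lt (cs : List Char) (h : cs ≠ []) (x : Nat) (hx : x ∈ boundsN cs) :
    x < cs.length := by
  rcases hx with _ | hx
  · exact List.length_pos_of_ne_nil h
  · rename_i hx
    have := List.mem_filter.mp hx
    obtain ⟨k, hk, rfl⟩ := List.mem_map.mp this.1
    have := List.mem_range.mp hk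
    omega

theorem pairsOf_snoc (l : List Nat) (b n : Nat) :
    pairsOf (l ++ [b]) n = pairsOf l b ++ [(b, n)] := by
  cases l with
  | nil => simp [pairsOf]
  | cons a l =>
    show ((a :: l) ++ [b]).zip ((l ++ [b]) ++ [n]) = (a :: l).zip (l ++ [b]) ++ [b].zip [n]
    exact List.zip_append (by simp)

theorem slice_append_of_le (cs : List Char) (ch : Char) (a b : Nat)
    (ha : a ≤ cs.length) (hb : b ≤ cs.length) :
    ((cs ++ [ch]).drop a).take (b - a) = (cs.drop a).take (b - a) := by
  rw [List.drop_append_of_le_length ha, List.take_append_of_le_length (by simp; omega)]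

-- appending one character adds the boundary cs.length iff it is uppercase
theorem boundsN_snoc (cs : List Char) (ch : Char) (h : cs ≠ []) :
    boundsN (cs ++ [ch]) =
      boundsN cs ++ (if PySem.Chars.isupper ch then [cs.length] else []) := by
  have hl : 1 ≤ cs.length := List.length_pos_of_ne_nil h
  have hlen : (cs ++ [ch]).length - 1 = cs.length := by simp
  have hR : List.range cs.length = List.range (cs.length - 1) ++ [cs.length - 1] := by
    rw [← List.range_succ]; congr 1; omega
  have hfilter : ((List.range (cs.length - 1)).map (· + 1)).filter
        (fun i => PySem.Chars.isupper ((cs ++ [ch]).getD i ' ')) =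
      ((List.range (cs.length - 1)).map (· + 1)).filter
        (fun i => PySem.Chars.isupper (cs.getD i ' ')) := by
    apply List.filter_congr
    intro x hx
    obtain ⟨k, hk, rfl⟩ := List.mem_map.mp hx
    have hkr := List.mem_range.mp hk
    rw [List.getD_append _ _ _ _ (show k + 1 < cs.length by omega)]
  have hgd : (cs ++ [ch]).getD (cs.length - 1 + 1) ' ' = ch := by
    rw [show cs.length - 1 + 1 = cs.length by omega,
      List.getD_append_right _ _ _ _ (le_refl _)]
    simp
  simp only [boundsN, hlen, hR, List.map_append, List.filter_append, List.map_cons,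
    List.map_nil, List.filter_cons, List.filter_nil, hfilter, hgd]
  by_cases hch : PySem.Chars.isupper ch
  · simp [hch, show cs.length - 1 + 1 = cs.length by omega]
  · simp [hch]

theorem tokensN_snoc_upper (cs : List Char) (ch : Char) (h : cs ≠ [])
    (hch : PySem.Chars.isupper ch = true) :
    tokensN (cs ++ [ch]) = tokensN cs ++ [[ch]] := by
  have hbl : boundsN (cs ++ [ch]) = boundsN cs ++ [cs.length] := by
    rw [boundsN_snoc cs ch h, hch]; rfl
  unfold tokensN
  rw [hbl, show (cs ++ [ch]).length = cs.length + 1 by simp, pairsOf_snoc, List.map_append]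
  congr 1
  · apply List.map_congr_left
    intro p hp
    obtain ⟨hp1, hp2⟩ := List.of_mem_zip hp
    have h1 : p.1 < cs.length := mem_boundsN_lt cs h p.1 hp1
    have h2 : p.2 ≤ cs.length := by
      rcases List.mem_append.mp hp2 with h2 | h2
      · exact le_of_lt (mem_boundsN_lt cs h p.2 (List.mem_of_mem_tail h2))
      · simp at h2; omega
    exact slice_append_of_le cs ch p.1 p.2 h1.le h2
  · have hd : (cs ++ [ch]).drop cs.length = [ch] := by
      rw [List.drop_append_of_le_length (le_refl _), List.drop_length]; rfl
    simp [hd]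

theorem tokensN_decomp (cs : List Char) (h : cs ≠ []) :
    tokensN cs =
      ((pairsOf (boundsN cs).dropLast ((boundsN cs).getLastD 0)).map
        (fun p => (cs.drop p.1).take (p.2 - p.1))) ++
      [cs.drop ((boundsN cs).getLastD 0)] := by
  have hne : boundsN cs ≠ [] := by simp [boundsN]
  have hlast := mem_boundsN_lt cs h _ (getLastD_mem _ hne 0)
  conv_lhs => rw [tokensN, ← dropLast_append_getLastD (boundsN cs) hne 0, pairsOf_snoc]
  rw [List.map_append]
  congr 1
  simp only [List.map_cons, List.map_nil]
  rw [List.take_of_length_le (by simp)]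

theorem tokensN_snoc_lower (cs : List Char) (ch : Char) (h : cs ≠ [])
    (hch : PySem.Chars.isupper ch = false) :
    tokensN (cs ++ [ch]) = (tokensN cs).dropLast ++ [(tokensN cs).getLastD [] ++ [ch]] := by
  have hne : boundsN cs ≠ [] := by simp [boundsN]
  have hbl : boundsN (cs ++ [ch]) = boundsN cs := by
    rw [boundsN_snoc cs ch h, hch]; simp
  have hlast := mem_boundsN_lt cs h _ (getLastD_mem _ hne 0)
  rw [tokensN_decomp (cs ++ [ch]) (by simp), tokensN_decomp cs h, hbl,
    List.dropLast_concat, List.getLastD_concat]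
  congr 1
  · apply List.map_congr_left
    intro p hp
    obtain ⟨hp1, hp2⟩ := List.of_mem_zip hp
    have h1 : p.1 < cs.length :=
      mem_boundsN_lt cs h p.1 (List.mem_of_mem_dropLast hp1)
    have h2 : p.2 < cs.length := by
      rcases List.mem_append.mp hp2 with h2 | h2
      · exact mem_boundsN_lt cs h p.2
          (List.mem_of_mem_dropLast (List.mem_of_mem_tail h2))
      · exact (List.mem_singleton.mp h2) ▸ hlast
    exact slice_append_of_le cs ch p.1 p.2 h1.le h2.le
  · rw [List.drop_append_of_le_length hlast.le]

theorem tokensN_eq_goTok (c : Char) (rest : List Char) :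
    tokensN (c :: rest) = goTok [c] rest := by
  induction rest using List.reverseRecOn with
  | nil => simp [tokensN, boundsN, pairsOf, goTok]
  | append_singleton r ch ih =>
    have hne : (c :: r) ≠ [] := by simp
    rw [goTok_snoc]
    by_cases hch : PySem.Chars.isupper ch
    · rw [if_pos hch, ← ih, show c :: (r ++ [ch]) = (c :: r) ++ [ch] from rfl,
        tokensN_snoc_upper (c :: r) ch hne hch]
    · rw [if_neg hch, show c :: (r ++ [ch]) = (c :: r) ++ [ch] from rfl,
        tokensN_snoc_lower (c :: r) ch hne (by simpa using hch), ih]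

-- Bridge: B's Int-level port equals the Nat-level formulation
theorem alt_eq_tokensN (rep : String) :
    into_elements_alt rep = (tokensN rep.toList).map String.mk := by
  unfold into_elements_alt tokensN boundsN pairsOf
  dsimp only
  set cs := rep.toList with hcs
  have hrange : PySem.List.pyRange 1 (cs.length : Int) 1 =
      ((List.range (cs.length - 1)).map (· + 1)).map (fun k : Nat => (k : Int)) := by
    rw [PySem.List.pyRange_one]
    have h1 : ((cs.length : Int) - 1).toNat = cs.length - 1 := by omega
    rw [h1, List.map_map]
    apply List.map_congr_left
    intro k _
    simp
    omega
  rw [hrange, List.filter_map]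
  have hfc :
      (((List.range (cs.length - 1)).map (· + 1)).filter
        ((fun i => PySem.Chars.isupper (PySem.List.pyGetD cs i ' ')) ∘ (fun k : Nat => (k : Int)))) =
      (((List.range (cs.length - 1)).map (· + 1)).filter
        (fun i => PySem.Chars.isupper (cs.getD i ' '))) := by
    apply List.filter_congr
    intro x _
    simp [Function.comp, PySem.List.pyGetD_natCast]
  rw [hfc]
  set bl := ((List.range (cs.length - 1)).map (· + 1)).filter
      (fun i => PySem.Chars.isupper (cs.getD i ' ')) with hbl
  have hcast : (0 : Int) :: bl.map (fun k : Nat => (k : Int)) =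
      ((0 : Nat) :: bl).map (fun k : Nat => (k : Int)) := by simp
  rw [hcast]
  have htail : (((0 : Nat) :: bl).map (fun k : Nat => (k : Int))).tail ++ [(cs.length : Int)] =
      (((0 : Nat) :: bl).tail ++ [cs.length]).map (fun k : Nat => (k : Int)) := by
    simp
  rw [htail, List.zip_map, List.map_map, List.map_map]
  apply List.map_congr_left
  intro p _
  simp only [Function.comp, Prod.map]
  rw [PySem.List.slice_natCast]

theorem a_eq_goTok (rep : String) (c : Char) (rest : List Char)
    (h : rep.toList = c :: rest) :
    into_elements rep = (goTok [c] rest).map String.mk := by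
  unfold into_elements
  rw [h]
  simp only []
  rw [foldl_goTok]
  simp

-- ===== VERDICT (by name: the statement is the Claim_ definition above) =====
theorem into_elements_spec : Claim_equal_into_elements := by
  unfold Claim_equal_into_elements
  intro rep _ hpre
  unfold Spec_into_elements
  cases h : rep.toList with
  | nil =>
    exact absurd (by apply String.ext; simpa using h) hpre
  | cons c rest =>
    rw [a_eq_goTok rep c rest h, alt_eq_tokensN, h, tokensN_eq_goTok]
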